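-- pv_equiv track=rewrite | github.com/warteschleife/cw2wav | util/compare.py | compare_parts
-- ===== SOURCE A (Python) =====
-- def count_chars(text):
--     result = 0
--     for t in text:
--         if t == "r":
--             result = result + 1
--     return result
--
-- def compare_parts(text_a, text_b):
--     if len(text_a) == 0 and len(text_b) == 0:
--         return ("", "")
--
--     possible_result = []
--
--     if len(text_a) < len(text_b):
--         result = compare_parts(text_a, text_b[1:])
--         possible_result.append((" " + result[0], "m" + result[1]))
--     if len(text_a) > 0:
--         if text_a[0] == text_b[0]:
--             result = compare_parts(text_a[1:], text_b[1:])
--             possible_result.append((text_a[0] + result[0], "r" + result[1]))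
--         else:
--             result = compare_parts(text_a[1:], text_b[1:])
--             possible_result.append((text_a[0] + result[0], "f" + result[1]))
--
--     result = possible_result[0]
--     points = count_chars(result[1])
--     for pr in possible_result[1:]:
--         pt = count_chars(pr[1])
--         if pt > points:
--             points = pt
--             result = pr
--     return result
-- ===== SOURCE B (Python) =====
-- def _sufmax(vals):
--     # suffix maxima of vals
--     if len(vals) <= 1:
--         return vals[:]
--     rest = _sufmax(vals[1:])
--     return [max(vals[0], rest[0])] + rest
--
-- def compare_parts(text_a, text_b):
--     a, b, n, m = text_a, text_b, len(text_a), len(text_b)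
--     w = m - n
--     # banded DP over the offset t = j - i (0..w): rows[i][t] = maximum number of
--     # matched ('r') positions aligning a[i:] inside b[i+t:]; built bottom-up.
--     rows = [[0] * (w + 1)]
--     for k in range(n):
--         i = n - 1 - k
--         prev = rows[-1]
--         rows.append(_sufmax([prev[t] + (1 if a[i] == b[i + t] else 0)
--                              for t in range(w + 1)]))
--     rows.reverse()
--     # forward reconstruction, preferring the skip ('m') move on ties
--     out_a, out_m, i, t = [], [], 0, 0
--     while i < n or t < w:
--         if t < w and (i == n or rows[i][t + 1] >= rows[i + 1][t] + (1 if a[i] == b[i + t] else 0)):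
--             out_a.append(' '); out_m.append('m'); t += 1
--         else:
--             out_a.append(a[i]); out_m.append('r' if a[i] == b[i + t] else 'f'); i += 1
--     return (''.join(out_a), ''.join(out_m))
-- ===== Notes on version B (the rewrite author's own statement) =====
-- stated objective: faster
-- what changed: Replaces the exponential branching recursion (which re-solves shared suffix states and rescans marker strings to count 'r's) with a banded dynamic-programming table over the offset j-i, built bottom-up, plus one forward reconstruction pass with the same tie-breaking (skip preferred on ties).
import Mathlib
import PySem

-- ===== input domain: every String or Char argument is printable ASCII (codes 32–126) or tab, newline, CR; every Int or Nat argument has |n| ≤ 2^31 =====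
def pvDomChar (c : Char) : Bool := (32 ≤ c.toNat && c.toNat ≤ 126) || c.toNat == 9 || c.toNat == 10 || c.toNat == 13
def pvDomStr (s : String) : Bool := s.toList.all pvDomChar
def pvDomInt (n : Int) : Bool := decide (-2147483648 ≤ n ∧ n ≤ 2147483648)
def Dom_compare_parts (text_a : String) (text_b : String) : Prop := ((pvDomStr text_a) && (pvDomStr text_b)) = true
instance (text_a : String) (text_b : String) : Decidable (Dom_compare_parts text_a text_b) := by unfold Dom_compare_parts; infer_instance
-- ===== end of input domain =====

-- B replaces A's exponential branching recursion by a banded dynamic-programming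
-- table of match counts plus one forward reconstruction pass with the same tie rule.

-- ===== PORT A =====

-- port of count_chars: counts the characters equal to 'r'
def count_chars (text : List Char) : Int :=
  text.foldl (fun result t => if t = 'r' then result + 1 else result) 0

-- recursion of A over the two strings as char lists; `none` = Python raises
-- (text_b[0] on an empty text_b raises IndexError, and possible_result[0] on an
-- empty list would too)
def cpA (la : List Char) (lb : List Char) : Option (List Char × List Char) :=
  if la.length = 0 ∧ lb.length = 0 then some ([], []) else
  let o1 : Option (List (List Char × List Char)) :=
    if _h : la.length < lb.length then
      (cpA la lb.tail).map (fun r => [(' ' :: r.1, 'm' :: r.2)])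
    else some []
  match o1 with
  | none => none
  | some p1 =>
    let o2 : Option (List (List Char × List Char)) :=
      match la, lb with
      | [], _ => some []
      | ha :: ta, hb :: tb =>
        (cpA ta tb).map (fun r =>
          if ha = hb then [(ha :: r.1, 'r' :: r.2)] else [(ha :: r.1, 'f' :: r.2)])
      | _ :: _, [] => none
    match o2 with
    | none => none
    | some p2 =>
      match p1 ++ p2 with
      | [] => none
      | first :: rest =>
        some ((rest.foldl (fun acc pr =>
          let pt := count_chars pr.2
          if pt > acc.2 then (pr, pt) else acc) (first, count_chars first.2)).1)
termination_by la.length + lb.length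
decreasing_by
  · simp only [List.length_tail]; omega
  · simp; omega

def compare_parts (text_a : String) (text_b : String) : String × String :=
  match cpA text_a.toList text_b.toList with
  | some r => (String.mk r.1, String.mk r.2)
  | none => ("", "")   -- unreachable: A raises there (outside Pre_)

-- ===== PORT B =====

-- port of _sufmax: suffix maxima of a list
def sufmax : List Int → List Int
  | [] => []
  | [x] => [x]
  | x :: y :: tl =>
    let rest := sufmax (y :: tl)
    (max x (rest.getD 0 0)) :: rest

-- the bracketed comprehension [prev[t] + (1 if a[i]==b[i+t] else 0) for t in range(w+1)]
def takesFor (a b : List Char) (w i : Nat) (prev : List Int) : List Int :=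
  (List.range (w+1)).map (fun t =>
    prev.getD t 0 + (if a.getD i ' ' = b.getD (i+t) ' ' then (1:Int) else 0))

-- the `for k in range(n)` loop appending banded DP rows bottom-up, then `rows.reverse()`
def buildRows (a b : List Char) (n w : Nat) : List (List Int) :=
  ((List.range n).foldl (fun rows k =>
      rows ++ [sufmax (takesFor a b w (n - 1 - k) (rows.getLastD []))])
    [List.replicate (w+1) (0:Int)]).reverse

-- the `while i < n or t < w` reconstruction loop (fuel = n+w bounds the steps)
def recon (a b : List Char) (n w : Nat) (rows : List (List Int)) :
    Nat → Nat → Nat → List Char × List Char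
  | 0, _, _ => ([], [])
  | fuel+1, i, t =>
    if i < n ∨ t < w then
      if (t < w ∧
          (i = n ∨ (rows.getD i []).getD (t+1) 0 ≥
                   (rows.getD (i+1) []).getD t 0 +
                     (if a.getD i ' ' = b.getD (i+t) ' ' then (1:Int) else 0))) then
        let r := recon a b n w rows fuel i (t+1)
        (' ' :: r.1, 'm' :: r.2)
      else
        let r := recon a b n w rows fuel (i+1) t
        (a.getD i ' ' :: r.1,
         (if a.getD i ' ' = b.getD (i+t) ' ' then 'r' else 'f') :: r.2)
    else ([], [])

def compare_parts_alt (text_a : String) (text_b : String) : String × String :=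
  let a := text_a.toList
  let b := text_b.toList
  let n := a.length
  let w := b.length - a.length
  let rows := buildRows a b n w
  let r := recon a b n w rows (n + w) 0 0
  (String.mk r.1, String.mk r.2)

-- ===== PRECONDITION & SPEC =====
-- Pre_ excludes exactly the inputs with len(text_a) > len(text_b), on which A
-- raises IndexError (text_b[0] once text_b is exhausted).
def Pre_compare_parts (text_a : String) (text_b : String) : Prop :=
  text_a.length ≤ text_b.length
instance (text_a : String) (text_b : String) : Decidable (Pre_compare_parts text_a text_b) := by
  unfold Pre_compare_parts; infer_instance

def pvWitness_compare_parts : String × String := ("rba", "xrbay")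

def Spec_compare_parts (text_a : String) (text_b : String) (out : String × String) : Prop :=
  out = compare_parts_alt text_a text_b
instance (text_a : String) (text_b : String) (out : String × String) : Decidable (Spec_compare_parts text_a text_b out) := by unfold Spec_compare_parts; infer_instance

-- ===== CLAIM (what is proved, stated in full; the proofs are below) =====
def Claim_equal_compare_parts : Prop := ∀ (text_a : String) (text_b : String), Dom_compare_parts text_a text_b → Pre_compare_parts text_a text_b → Spec_compare_parts text_a text_b (compare_parts text_a text_b)

-- ===== LEMMAS AND PROOFS =====

theorem count_chars_aux (l : List Char) (acc : Int) :
    l.foldl (fun r t => if t = 'r' then r + 1 else r) acc = acc + (l.count 'r' : Int) := by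
  induction l generalizing acc with
  | nil => simp
  | cons c l ih =>
    simp only [List.foldl_cons, List.count_cons, ih]
    by_cases h : c = 'r' <;> simp [h] <;> push_cast <;> ring

theorem count_chars_cons (c : Char) (l : List Char) :
    count_chars (c :: l) = (if c = 'r' then 1 else 0) + count_chars l := by
  simp only [count_chars, List.foldl_cons, count_chars_aux]
  by_cases h : c = 'r' <;> simp [h]

theorem cpA_nil_nil : cpA [] [] = some ([], []) := by
  rw [cpA]; simp

theorem cpA_nil_cons (hb : Char) (tb : List Char) :
    cpA [] (hb :: tb) = (cpA [] tb).map (fun r => (' ' :: r.1, 'm' :: r.2)) := by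
  rw [cpA]
  cases h : cpA [] tb <;> simp [h, count_chars]

theorem cpA_cons_cons (ha : Char) (ta : List Char) (hb : Char) (tb : List Char) :
    cpA (ha :: ta) (hb :: tb) =
      if ta.length < tb.length then
        match cpA (ha :: ta) tb, cpA ta tb with
        | some r1, some r2 =>
          some (if count_chars ((if ha = hb then 'r' else 'f') :: r2.2) >
                    count_chars ('m' :: r1.2)
                then (ha :: r2.1, (if ha = hb then 'r' else 'f') :: r2.2)
                else (' ' :: r1.1, 'm' :: r1.2))
        | _, _ => none
      else
        (cpA ta tb).map (fun r => (ha :: r.1, (if ha = hb then 'r' else 'f') :: r.2)) := by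
  rw [cpA]
  by_cases he : ha = hb
  · subst he
    by_cases hlt : ta.length < tb.length
    · cases h1 : cpA (ha :: ta) tb <;> cases h2 : cpA ta tb <;>
        simp [hlt, h1, h2] <;> (try (split <;> rfl))
    · cases h2 : cpA ta tb <;> simp [hlt, h2]
  · by_cases hlt : ta.length < tb.length
    · cases h1 : cpA (ha :: ta) tb <;> cases h2 : cpA ta tb <;>
        simp [hlt, h1, h2, he] <;> (try (split <;> rfl))
    · cases h2 : cpA ta tb <;> simp [hlt, h2, he]

theorem sufmax_length (l : List Int) : (sufmax l).length = l.length := by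
  induction l with
  | nil => rfl
  | cons x tl ih =>
    cases tl with
    | nil => rfl
    | cons y tl2 => simp only [sufmax, List.length_cons] at *; omega

theorem sufmax_getD_last (l : List Int) (h : l ≠ []) :
    (sufmax l).getD (l.length - 1) 0 = l.getD (l.length - 1) 0 := by
  induction l with
  | nil => exact absurd rfl h
  | cons x tl ih =>
    cases tl with
    | nil => rfl
    | cons y tl2 =>
      have : (x :: y :: tl2).length - 1 = (y :: tl2).length - 1 + 1 := by
        simp
      rw [this]
      show (sufmax (y :: tl2)).getD ((y :: tl2).length - 1) 0 = _
      rw [ih (by simp)]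
      simp only [List.length_cons, Nat.add_sub_cancel, List.getD_eq_getElem?_getD]
      rfl

theorem sufmax_getD (l : List Int) :
    ∀ t, t + 1 < l.length →
      (sufmax l).getD t 0 = max (l.getD t 0) ((sufmax l).getD (t+1) 0) := by
  induction l with
  | nil => intro t ht; simp at ht
  | cons x tl ih =>
    intro t ht
    cases tl with
    | nil => simp at ht
    | cons y tl2 =>
      cases t with
      | zero => simp [sufmax]
      | succ t =>
        show (sufmax (y :: tl2)).getD t 0 = _
        rw [ih t (by simpa using ht)]
        show _ = max ((y :: tl2).getD t 0) ((sufmax (y :: tl2)).getD (t+1) 0)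
        rfl

theorem takesFor_length (a b : List Char) (w i : Nat) (prev : List Int) :
    (takesFor a b w i prev).length = w + 1 := by
  simp [takesFor]

theorem takesFor_getD (a b : List Char) (w i t : Nat) (prev : List Int) (ht : t ≤ w) :
    (takesFor a b w i prev).getD t 0 =
      prev.getD t 0 + (if a.getD i ' ' = b.getD (i+t) ' ' then (1:Int) else 0) := by
  unfold takesFor
  rw [List.getD_eq_getElem _ _ (by simp; omega)]
  simp

-- proof-side view of B's rows
def rowAux (a b : List Char) (n w : Nat) : Nat → List Int
  | 0 => List.replicate (w+1) 0
  | s+1 => sufmax (takesFor a b w (n - (s+1)) (rowAux a b n w s))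

theorem rowAux_length (a b : List Char) (n w : Nat) (s : Nat) :
    (rowAux a b n w s).length = w + 1 := by
  cases s with
  | zero => simp [rowAux]
  | succ s => rw [rowAux, sufmax_length, takesFor_length]

theorem rowAux_zero_getD (a b : List Char) (n w : Nat) (x : Nat) :
    (rowAux a b n w 0).getD x 0 = 0 := by
  simp only [rowAux]
  rcases Nat.lt_or_ge x (w+1) with h | h
  · rw [List.getD_eq_getElem _ _ (by simpa using h)]; simp
  · rw [List.getD_eq_default _ _ (by simpa using h)]

theorem buildRows_eq (a b : List Char) (n w : Nat) :
    buildRows a b n w = ((List.range (n+1)).map (rowAux a b n w)).reverse := by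
  unfold buildRows
  have key : ∀ K : Nat,
      (List.range K).foldl (fun rows k =>
        rows ++ [sufmax (takesFor a b w (n - 1 - k) (rows.getLastD []))])
        [List.replicate (w+1) (0:Int)]
      = (List.range (K+1)).map (rowAux a b n w) := by
    intro K
    induction K with
    | zero => simp [rowAux]
    | succ K ih =>
      rw [List.range_succ, List.foldl_append, ih]
      have hlast : ((List.range (K+1)).map (rowAux a b n w)).getLastD [] = rowAux a b n w K := by
        rw [List.range_succ, List.map_append]
        simp
      have hrw : List.range (K+1+1) = List.range (K+1) ++ [K+1] := List.range_succ
      rw [hrw, List.map_append]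
      simp only [List.foldl_cons, List.foldl_nil, hlast, List.map_cons, List.map_nil]
      have : rowAux a b n w (K+1) = sufmax (takesFor a b w (n - 1 - K) (rowAux a b n w K)) := by
        show sufmax (takesFor a b w (n - (K+1)) _) = _
        congr 2
        omega
      rw [this]
  rw [key n]

theorem rowGet (a b : List Char) (n w i : Nat) (hi : i ≤ n) :
    (buildRows a b n w).getD i [] = rowAux a b n w (n - i) := by
  rw [buildRows_eq]
  have hi' : i < ((List.range (n+1)).map (rowAux a b n w)).reverse.length := by
    simp; omega
  rw [List.getD_eq_getElem _ _ hi']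
  rw [List.getElem_reverse]
  simp only [List.getElem_map, List.getElem_range]
  congr 1
  simp

theorem recon_succ (a b : List Char) (n w : Nat) (rows : List (List Int)) (fuel i t : Nat) :
    recon a b n w rows (fuel+1) i t =
      if i < n ∨ t < w then
        if (t < w ∧
            (i = n ∨ (rows.getD i []).getD (t+1) 0 ≥
                     (rows.getD (i+1) []).getD t 0 +
                       (if a.getD i ' ' = b.getD (i+t) ' ' then (1:Int) else 0))) then
          let r := recon a b n w rows fuel i (t+1)
          (' ' :: r.1, 'm' :: r.2)
        else
          let r := recon a b n w rows fuel (i+1) t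
          (a.getD i ' ' :: r.1,
           (if a.getD i ' ' = b.getD (i+t) ' ' then 'r' else 'f') :: r.2)
      else ([], []) := rfl

theorem main_base (a b : List Char) (hnm : a.length ≤ b.length) (fuel : Nat) :
    cpA (a.drop a.length) (b.drop (a.length + (b.length - a.length))) =
      some (recon a b a.length (b.length - a.length)
        (buildRows a b a.length (b.length - a.length)) fuel a.length (b.length - a.length)) ∧
    count_chars (recon a b a.length (b.length - a.length)
        (buildRows a b a.length (b.length - a.length)) fuel a.length (b.length - a.length)).2 =
      (rowAux a b a.length (b.length - a.length) (a.length - a.length)).getD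
        (b.length - a.length) 0 := by
  have hrecon : recon a b a.length (b.length - a.length)
      (buildRows a b a.length (b.length - a.length)) fuel a.length (b.length - a.length)
      = ([], []) := by
    cases fuel with
    | zero => rfl
    | succ f => rw [recon_succ, if_neg (by omega)]
  rw [hrecon]
  have hm : a.length + (b.length - a.length) = b.length := by omega
  constructor
  · rw [hm, List.drop_length, List.drop_length, cpA_nil_nil]
  · rw [Nat.sub_self, rowAux_zero_getD]
    simp [count_chars]

theorem main_aux (a b : List Char) (hnm : a.length ≤ b.length) (d : Nat) :
    ∀ i t, i ≤ a.length → t ≤ b.length - a.length →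
    (a.length - i) + ((b.length - a.length) - t) ≤ d →
    ∀ fuel, (a.length - i) + ((b.length - a.length) - t) ≤ fuel →
    cpA (a.drop i) (b.drop (i+t)) =
      some (recon a b a.length (b.length - a.length)
        (buildRows a b a.length (b.length - a.length)) fuel i t) ∧
    count_chars (recon a b a.length (b.length - a.length)
        (buildRows a b a.length (b.length - a.length)) fuel i t).2 =
      (rowAux a b a.length (b.length - a.length) (a.length - i)).getD t 0 := by
  induction d with
  | zero =>
    intro i t hi ht hd fuel hfuel
    have hin : i = a.length := by omega
    have htw : t = b.length - a.length := by omega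
    subst hin; subst htw
    exact main_base a b hnm fuel
  | succ d ih =>
    intro i t hi ht hd fuel hfuel
    by_cases hterm : i = a.length ∧ t = b.length - a.length
    · obtain ⟨h1, h2⟩ := hterm; subst h1; subst h2; exact main_base a b hnm fuel
    · have hmeas : 1 ≤ (a.length - i) + ((b.length - a.length) - t) := by omega
      obtain ⟨f, rfl⟩ : ∃ f, fuel = f + 1 := ⟨fuel - 1, by omega⟩
      by_cases hin : i = a.length
      · -- text_a exhausted: only the skip ('m') move
        subst hin
        have htw : t < b.length - a.length := by omega
        have hjm : a.length + t < b.length := by omega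
        obtain ⟨ih1, ih2⟩ := ih a.length (t+1) (Nat.le_refl _) (by omega) (by omega)
          f (by omega)
        rw [List.drop_length] at ih1
        have heq : a.length + (t+1) = a.length + t + 1 := by omega
        rw [heq] at ih1
        constructor
        · rw [List.drop_length, List.drop_eq_getElem_cons hjm, cpA_nil_cons, ih1]
          rw [recon_succ, if_pos (Or.inr htw), if_pos ⟨htw, Or.inl rfl⟩]
          simp
        · rw [recon_succ, if_pos (Or.inr htw), if_pos ⟨htw, Or.inl rfl⟩]
          simp only [count_chars_cons]
          rw [Nat.sub_self] at *
          rw [rowAux_zero_getD] at ih2 ⊢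
          simp [ih2]
      · have hin' : i < a.length := by omega
        have hjm : i + t < b.length := by omega
        have hda : a.drop i = a[i] :: a.drop (i+1) := List.drop_eq_getElem_cons hin'
        have hdb : b.drop (i+t) = b[i+t] :: b.drop (i+t+1) := List.drop_eq_getElem_cons hjm
        obtain ⟨ihT1, ihT2⟩ := ih (i+1) t (by omega) (by omega) (by omega) f (by omega)
        have heqT : i + 1 + t = i + t + 1 := by omega
        rw [heqT] at ihT1
        have hga : a.getD i ' ' = a[i] := List.getD_eq_getElem a ' ' hin'
        have hgb : b.getD (i+t) ' ' = b[i+t] := List.getD_eq_getElem b ' ' hjm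
        have hrgi : (buildRows a b a.length (b.length - a.length)).getD i [] =
            rowAux a b a.length (b.length - a.length) (a.length - i) :=
          rowGet a b a.length (b.length - a.length) i (by omega)
        have hrgi1 : (buildRows a b a.length (b.length - a.length)).getD (i+1) [] =
            rowAux a b a.length (b.length - a.length) (a.length - (i+1)) :=
          rowGet a b a.length (b.length - a.length) (i+1) (by omega)
        have hrow : rowAux a b a.length (b.length - a.length) (a.length - i) =
            sufmax (takesFor a b (b.length - a.length) i
              (rowAux a b a.length (b.length - a.length) (a.length - (i+1)))) := by
          have hs : a.length - i = (a.length - (i+1)) + 1 := by omega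
          rw [hs]
          show sufmax (takesFor a b _ (a.length - (a.length - (i+1) + 1)) _) = _
          congr 2
          omega
        have hlen : (rowAux a b a.length (b.length - a.length) (a.length - i)).length
            = (b.length - a.length) + 1 := rowAux_length ..
        by_cases hlt : t < b.length - a.length
        · -- both moves possible: argmax with skip preferred on ties
          obtain ⟨ihS1, ihS2⟩ := ih i (t+1) (by omega) (by omega) (by omega) f (by omega)
          have heqS : i + (t+1) = i + t + 1 := by omega
          rw [heqS] at ihS1
          rw [hda] at ihS1
          have hltl : (a.drop (i+1)).length < (b.drop (i+t+1)).length := by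
            simp [List.length_drop]; omega
          have hval : (rowAux a b a.length (b.length - a.length) (a.length - i)).getD t 0 =
              max ((rowAux a b a.length (b.length - a.length) (a.length - (i+1))).getD t 0 +
                     (if a[i] = b[i+t] then (1:Int) else 0))
                  ((rowAux a b a.length (b.length - a.length) (a.length - i)).getD (t+1) 0) := by
            rw [hrow, sufmax_getD _ t (by rw [takesFor_length]; omega),
              takesFor_getD a b _ i t _ (by omega), hga, hgb, ← hrow]
          have hbranch :
              recon a b a.length (b.length - a.length)
                (buildRows a b a.length (b.length - a.length)) (f+1) i t =
              if (rowAux a b a.length (b.length - a.length) (a.length - i)).getD (t+1) 0 ≥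
                 (rowAux a b a.length (b.length - a.length) (a.length - (i+1))).getD t 0 +
                   (if a[i] = b[i+t] then (1:Int) else 0) then
                (' ' :: (recon a b a.length (b.length - a.length)
                    (buildRows a b a.length (b.length - a.length)) f i (t+1)).1,
                 'm' :: (recon a b a.length (b.length - a.length)
                    (buildRows a b a.length (b.length - a.length)) f i (t+1)).2)
              else
                (a[i] :: (recon a b a.length (b.length - a.length)
                    (buildRows a b a.length (b.length - a.length)) f (i+1) t).1,
                 (if a[i] = b[i+t] then 'r' else 'f') ::
                   (recon a b a.length (b.length - a.length)
                    (buildRows a b a.length (b.length - a.length)) f (i+1) t).2) := by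
            rw [recon_succ, if_pos (Or.inl hin'), hrgi, hrgi1, hga, hgb]
            by_cases hge : (rowAux a b a.length (b.length - a.length) (a.length - i)).getD (t+1) 0 ≥
                (rowAux a b a.length (b.length - a.length) (a.length - (i+1))).getD t 0 +
                  (if a[i] = b[i+t] then (1:Int) else 0)
            · rw [if_pos ⟨hlt, Or.inr hge⟩, if_pos hge]
            · rw [if_neg (by
                  intro hc
                  rcases hc.2 with h | h
                  · omega
                  · exact hge h), if_neg hge]
          by_cases hge : (rowAux a b a.length (b.length - a.length) (a.length - i)).getD (t+1) 0 ≥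
              (rowAux a b a.length (b.length - a.length) (a.length - (i+1))).getD t 0 +
                (if a[i] = b[i+t] then (1:Int) else 0)
          · constructor
            · rw [hda, hdb, cpA_cons_cons, if_pos hltl, ihS1, ihT1, hbranch, if_pos hge]
              simp only [count_chars_cons, ihS2, ihT2]
              rw [if_neg (by by_cases he : a[i] = b[i+t] <;> simp [he] at hge ⊢ <;>
                (try intros) <;> omega)]
            · rw [hbranch, if_pos hge, hval]
              simp only [count_chars_cons, ihS2]
              by_cases he : a[i] = b[i+t] <;> simp [he, max_def] at hge ⊢ <;>
                (try split_ifs) <;> (try intros) <;> omega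
          · constructor
            · rw [hda, hdb, cpA_cons_cons, if_pos hltl, ihS1, ihT1, hbranch, if_neg hge]
              simp only [count_chars_cons, ihS2, ihT2]
              rw [if_pos (by by_cases he : a[i] = b[i+t] <;> simp [he] at hge ⊢ <;>
                (try intros) <;> omega)]
            · rw [hbranch, if_neg hge, hval]
              simp only [count_chars_cons, ihT2]
              by_cases he : a[i] = b[i+t] <;> simp [he, max_def] at hge ⊢ <;>
                (try split_ifs) <;> (try intros) <;> omega
        · -- t = w: the band's right edge, only the consume move
          have htw : t = b.length - a.length := by omega
          have hltl : ¬ (a.drop (i+1)).length < (b.drop (i+t+1)).length := by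
            simp [List.length_drop]; omega
          have hval : (rowAux a b a.length (b.length - a.length) (a.length - i)).getD t 0 =
              (rowAux a b a.length (b.length - a.length) (a.length - (i+1))).getD t 0 +
                (if a[i] = b[i+t] then (1:Int) else 0) := by
            have hlast : (takesFor a b (b.length - a.length) i
                (rowAux a b a.length (b.length - a.length) (a.length - (i+1)))).length - 1 = t := by
              rw [takesFor_length]; omega
            have h2 := sufmax_getD_last (takesFor a b (b.length - a.length) i
                (rowAux a b a.length (b.length - a.length) (a.length - (i+1)))) (by
              intro hc
              have := takesFor_length a b (b.length - a.length) i
                (rowAux a b a.length (b.length - a.length) (a.length - (i+1)))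
              rw [hc] at this
              simp at this)
            rw [hlast] at h2
            rw [hrow, h2, takesFor_getD a b _ i t _ (by omega), hga, hgb]
          have hnc : ¬ (t < b.length - a.length ∧
              (i = a.length ∨
                ((buildRows a b a.length (b.length - a.length)).getD i []).getD (t+1) 0 ≥
                ((buildRows a b a.length (b.length - a.length)).getD (i+1) []).getD t 0 +
                  (if a.getD i ' ' = b.getD (i+t) ' ' then (1:Int) else 0))) :=
            fun hc => absurd hc.1 (by omega)
          constructor
          · rw [hda, hdb, cpA_cons_cons, if_neg hltl, ihT1]
            rw [recon_succ, if_pos (Or.inl hin'), if_neg hnc, hga, hgb]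
            simp
          · rw [recon_succ, if_pos (Or.inl hin'), if_neg hnc, hga, hgb, hval]
            simp only [count_chars_cons, ihT2]
            by_cases he : a[i] = b[i+t] <;> simp [he] <;> (try omega)


-- ===== VERDICT (by name: the statement is the Claim_ definition above) =====
theorem compare_parts_spec : Claim_equal_compare_parts := by
  intro ta tb _ hpre
  unfold Spec_compare_parts compare_parts compare_parts_alt
  have hlen : ta.toList.length ≤ tb.toList.length := by
    simpa [String.length_toList] using hpre
  obtain ⟨h1, -⟩ := main_aux ta.toList tb.toList hlen
    (ta.toList.length + (tb.toList.length - ta.toList.length))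
    0 0 (Nat.zero_le _) (Nat.zero_le _) (by omega)
    (ta.toList.length + (tb.toList.length - ta.toList.length)) (by omega)
  simp only [List.drop_zero, Nat.add_zero, Nat.zero_add] at h1
  rw [h1]
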